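-- pv_equiv track=rewrite | github.com/Arsen1302/Code-copy-detector | TestData/solutions/problem_763_3.py | solution_763_3
-- ===== SOURCE A (Python) =====
-- from typing import List
--
-- def solution_763_3(arr1: List[int], arr2: List[int]) -> int:
--     A=[]
--     B=[]
--     C=[]
--     D=[]
--     n=len(arr1)
--     for i in range(n):
--         A.append(arr1[i]+arr2[i]+i)
--         B.append(arr1[i]+arr2[i]-i)
--         C.append(arr1[i]-arr2[i]+i)
--         D.append(arr1[i]-arr2[i]-i)
--     a=max(A)-min(A)
--     b=max(B)-min(B)
--     c=max(C)-min(C)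
--     d=max(D)-min(D)
--     return max(a,b,c,d)
-- ===== SOURCE B (Python) =====
-- from typing import List
--
-- def solution_763_3(arr1: List[int], arr2: List[int]) -> int:
--     # Pairwise reformulation: the answer equals
--     #     max over 0 <= i <= j < n of  |arr1[i]-arr1[j]| + |arr2[i]-arr2[j]| + (j - i)
--     # (|x|+|y| = max(|x+y|,|x-y|), so each pair contributes exactly the largest of the
--     # four signed differences A's lists would see).  Computed best-trade style: one
--     # sweep keeping prefix extrema of u+i, u-i, v+i, v-i (u = a1+a2, v = a1-a2) and a
--     # single running best of "current value minus best earlier partner".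
--     u = arr1[0] + arr2[0]
--     v = arr1[0] - arr2[0]
--     min_up, max_um = u, u   # prefix min of u+i, prefix max of u-i
--     min_vp, max_vm = v, v   # prefix min of v+i, prefix max of v-i
--     best = 0                # the i == j pairs
--     for j in range(1, len(arr1)):
--         u = arr1[j] + arr2[j]
--         v = arr1[j] - arr2[j]
--         best = max(best, u + j - min_up, max_um - (u - j),
--                          v + j - min_vp, max_vm - (v - j))
--         min_up = min(min_up, u + j)
--         max_um = max(max_um, u - j)
--         min_vp = min(min_vp, v + j)
--         max_vm = max(max_vm, v - j)
--     return best
-- ===== Notes on version B (the rewrite author's own statement) =====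
-- stated objective: alternative
-- what changed: B recasts the task as the pairwise maximum of |arr1[i]-arr1[j]|+|arr2[i]-arr2[j]|+(j-i) and computes it best-trade style in one sweep: four prefix extrema plus a single running best, instead of A's four materialized lists with a global max and min of each.
import Mathlib
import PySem

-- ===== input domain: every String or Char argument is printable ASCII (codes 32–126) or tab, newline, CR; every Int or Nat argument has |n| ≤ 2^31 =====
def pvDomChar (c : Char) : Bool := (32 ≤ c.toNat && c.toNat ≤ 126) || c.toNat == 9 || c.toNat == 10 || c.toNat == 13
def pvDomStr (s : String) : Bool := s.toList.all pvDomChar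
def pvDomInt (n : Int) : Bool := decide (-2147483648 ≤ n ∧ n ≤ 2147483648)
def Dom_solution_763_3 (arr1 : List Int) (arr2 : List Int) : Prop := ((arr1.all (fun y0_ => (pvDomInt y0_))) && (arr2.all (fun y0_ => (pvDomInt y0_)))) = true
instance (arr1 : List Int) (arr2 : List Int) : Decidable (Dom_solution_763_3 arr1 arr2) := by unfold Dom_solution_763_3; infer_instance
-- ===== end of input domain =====

-- B recasts the task as the pairwise maximum of |a1[i]-a1[j]|+|a2[i]-a2[j]|+(j-i), computed in
-- one sweep with four prefix extrema and a running best, instead of A's four lists with a global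
-- max/min of each. Return value only; neither program mutates its arguments.

-- ===== PORT A =====
-- loop body: append the four derived values to the four lists (indexing is total under Pre_)
def pvStepA (arr1 arr2 : List Int)
    (st : List Int × List Int × List Int × List Int) (i : Int) :
    List Int × List Int × List Int × List Int :=
  let x := PySem.List.pyGetD arr1 i 0
  let y := PySem.List.pyGetD arr2 i 0
  (st.1 ++ [x + y + i], st.2.1 ++ [x + y - i], st.2.2.1 ++ [x - y + i], st.2.2.2 ++ [x - y - i])

def solution_763_3 (arr1 : List Int) (arr2 : List Int) : Int :=
  let n : Int := arr1.length
  let st := (PySem.List.pyRange 0 n 1).foldl (pvStepA arr1 arr2) ([], [], [], [])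
  let a := ((PySem.List.max? st.1 (fun v => v)).getD 0) - ((PySem.List.min? st.1 (fun v => v)).getD 0)
  let b := ((PySem.List.max? st.2.1 (fun v => v)).getD 0) - ((PySem.List.min? st.2.1 (fun v => v)).getD 0)
  let c := ((PySem.List.max? st.2.2.1 (fun v => v)).getD 0) - ((PySem.List.min? st.2.2.1 (fun v => v)).getD 0)
  let d := ((PySem.List.max? st.2.2.2 (fun v => v)).getD 0) - ((PySem.List.min? st.2.2.2 (fun v => v)).getD 0)
  max (max (max a b) c) d

-- ===== PORT B =====
-- sweep state: four prefix extrema and the running best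
structure PvStB where
  minUp : Int
  maxUm : Int
  minVp : Int
  maxVm : Int
  best : Int
  deriving Repr, DecidableEq

def pvStepB (arr1 arr2 : List Int) (st : PvStB) (j : Int) : PvStB :=
  let u := PySem.List.pyGetD arr1 j 0 + PySem.List.pyGetD arr2 j 0
  let v := PySem.List.pyGetD arr1 j 0 - PySem.List.pyGetD arr2 j 0
  { minUp := min st.minUp (u + j), maxUm := max st.maxUm (u - j),
    minVp := min st.minVp (v + j), maxVm := max st.maxVm (v - j),
    best := max (max (max (max st.best (u + j - st.minUp)) (st.maxUm - (u - j)))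
                     (v + j - st.minVp)) (st.maxVm - (v - j)) }

def solution_763_3_alt (arr1 : List Int) (arr2 : List Int) : Int :=
  let u := PySem.List.pyGetD arr1 0 0 + PySem.List.pyGetD arr2 0 0
  let v := PySem.List.pyGetD arr1 0 0 - PySem.List.pyGetD arr2 0 0
  let st := (PySem.List.pyRange 1 arr1.length 1).foldl (pvStepB arr1 arr2) ⟨u, u, v, v, 0⟩
  st.best

-- ===== PRECONDITION & SPEC =====
-- Pre_ excludes exactly the inputs on which A raises: empty arr1 (ValueError from max([]))
-- and arr2 shorter than arr1 (IndexError).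
def Pre_solution_763_3 (arr1 : List Int) (arr2 : List Int) : Prop :=
  arr1 ≠ [] ∧ arr1.length ≤ arr2.length
instance (arr1 : List Int) (arr2 : List Int) : Decidable (Pre_solution_763_3 arr1 arr2) := by
  unfold Pre_solution_763_3; infer_instance

def pvWitness_solution_763_3 : List Int × List Int := ([1, -2, 3], [4, 0, -1])

def Spec_solution_763_3 (arr1 : List Int) (arr2 : List Int) (out : Int) : Prop :=
  out = solution_763_3_alt arr1 arr2
instance (arr1 : List Int) (arr2 : List Int) (out : Int) : Decidable (Spec_solution_763_3 arr1 arr2 out) := by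
  unfold Spec_solution_763_3; infer_instance

-- ===== CLAIM (what is proved, stated in full; the proofs are below) =====
def Claim_equal_solution_763_3 : Prop := ∀ (arr1 : List Int) (arr2 : List Int), Dom_solution_763_3 arr1 arr2 → Pre_solution_763_3 arr1 arr2 → Spec_solution_763_3 arr1 arr2 (solution_763_3 arr1 arr2)

-- ===== LEMMAS AND PROOFS =====

-- A's loop appends the image of each of the four derived functions.
theorem pvFoldA (arr1 arr2 : List Int) (L : List Int) (p q r s : List Int) :
    L.foldl (pvStepA arr1 arr2) (p, q, r, s) =
      (p ++ L.map (fun i => PySem.List.pyGetD arr1 i 0 + PySem.List.pyGetD arr2 i 0 + i),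
       q ++ L.map (fun i => PySem.List.pyGetD arr1 i 0 + PySem.List.pyGetD arr2 i 0 - i),
       r ++ L.map (fun i => PySem.List.pyGetD arr1 i 0 - PySem.List.pyGetD arr2 i 0 + i),
       s ++ L.map (fun i => PySem.List.pyGetD arr1 i 0 - PySem.List.pyGetD arr2 i 0 - i)) := by
  induction L generalizing p q r s with
  | nil => simp
  | cons a t ih => simp [pvStepA, ih]

-- B's step, with the four derived sequences abstracted as functions of the index.
def pvStepG (f1 f2 f3 f4 : Int → Int) (st : PvStB) (j : Int) : PvStB :=
  { minUp := min st.minUp (f1 j), maxUm := max st.maxUm (f2 j),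
    minVp := min st.minVp (f3 j), maxVm := max st.maxVm (f4 j),
    best := max (max (max (max st.best (f1 j - st.minUp)) (st.maxUm - f2 j))
                     (f3 j - st.minVp)) (st.maxVm - f4 j) }

-- Invariant of B's sweep after the indices [0, m) have been absorbed.
def PvInv (f1 f2 f3 f4 : Int → Int) (m : Int) (st : PvStB) : Prop :=
  ((∃ i, 0 ≤ i ∧ i < m ∧ st.minUp = f1 i) ∧ ∀ i, 0 ≤ i → i < m → st.minUp ≤ f1 i) ∧
  ((∃ i, 0 ≤ i ∧ i < m ∧ st.maxUm = f2 i) ∧ ∀ i, 0 ≤ i → i < m → f2 i ≤ st.maxUm) ∧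
  ((∃ i, 0 ≤ i ∧ i < m ∧ st.minVp = f3 i) ∧ ∀ i, 0 ≤ i → i < m → st.minVp ≤ f3 i) ∧
  ((∃ i, 0 ≤ i ∧ i < m ∧ st.maxVm = f4 i) ∧ ∀ i, 0 ≤ i → i < m → f4 i ≤ st.maxVm) ∧
  0 ≤ st.best ∧
  (∀ i j, 0 ≤ i → i ≤ j → j < m →
    f1 j - f1 i ≤ st.best ∧ f2 i - f2 j ≤ st.best ∧ f3 j - f3 i ≤ st.best ∧ f4 i - f4 j ≤ st.best) ∧
  (st.best = 0 ∨ ∃ i j, 0 ≤ i ∧ i ≤ j ∧ j < m ∧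
    (st.best = f1 j - f1 i ∨ st.best = f2 i - f2 j ∨ st.best = f3 j - f3 i ∨ st.best = f4 i - f4 j))

theorem pvInvStep (f1 f2 f3 f4 : Int → Int) (m : Int) (st : PvStB)
    (h : PvInv f1 f2 f3 f4 m st) (hm : 1 ≤ m) :
    PvInv f1 f2 f3 f4 (m + 1) (pvStepG f1 f2 f3 f4 st m) := by
  obtain ⟨⟨⟨i1, hi1a, hi1b, hi1c⟩, hb1⟩, ⟨⟨i2, hi2a, hi2b, hi2c⟩, hb2⟩,
    ⟨⟨i3, hi3a, hi3b, hi3c⟩, hb3⟩, ⟨⟨i4, hi4a, hi4b, hi4c⟩, hb4⟩, hbest0, hpair, hatt⟩ := h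
  simp only [PvInv, pvStepG]
  have hB : st.best ≤ max (max (max (max st.best (f1 m - st.minUp)) (st.maxUm - f2 m))
      (f3 m - st.minVp)) (st.maxVm - f4 m) := by
    apply le_trans (le_max_left _ _); apply le_trans (le_max_left _ _)
    apply le_trans (le_max_left _ _); exact le_max_left _ _
  have hE1 : f1 m - st.minUp ≤ max (max (max (max st.best (f1 m - st.minUp)) (st.maxUm - f2 m))
      (f3 m - st.minVp)) (st.maxVm - f4 m) := by
    apply le_trans (le_max_right st.best _); apply le_trans (le_max_left _ _)
    apply le_trans (le_max_left _ _); exact le_max_left _ _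
  have hE2 : st.maxUm - f2 m ≤ max (max (max (max st.best (f1 m - st.minUp)) (st.maxUm - f2 m))
      (f3 m - st.minVp)) (st.maxVm - f4 m) := by
    apply le_trans (le_max_right (max st.best (f1 m - st.minUp)) _)
    apply le_trans (le_max_left _ _); exact le_max_left _ _
  have hE3 : f3 m - st.minVp ≤ max (max (max (max st.best (f1 m - st.minUp)) (st.maxUm - f2 m))
      (f3 m - st.minVp)) (st.maxVm - f4 m) := by
    apply le_trans (le_max_right _ (f3 m - st.minVp)); exact le_max_left _ _
  have hE4 : st.maxVm - f4 m ≤ max (max (max (max st.best (f1 m - st.minUp)) (st.maxUm - f2 m))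
      (f3 m - st.minVp)) (st.maxVm - f4 m) := le_max_right _ _
  refine ⟨⟨?_, ?_⟩, ⟨?_, ?_⟩, ⟨?_, ?_⟩, ⟨?_, ?_⟩, ?_, ?_, ?_⟩
  · rcases min_choice st.minUp (f1 m) with h' | h'
    · exact ⟨i1, hi1a, by omega, by rw [h', hi1c]⟩
    · exact ⟨m, by omega, by omega, h'⟩
  · intro i h0 hi
    rcases lt_or_ge i m with h' | h'
    · exact le_trans (min_le_left _ _) (hb1 i h0 h')
    · rw [show i = m by omega]; exact min_le_right _ _
  · rcases max_choice st.maxUm (f2 m) with h' | h'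
    · exact ⟨i2, hi2a, by omega, by rw [h', hi2c]⟩
    · exact ⟨m, by omega, by omega, h'⟩
  · intro i h0 hi
    rcases lt_or_ge i m with h' | h'
    · exact le_trans (hb2 i h0 h') (le_max_left _ _)
    · rw [show i = m by omega]; exact le_max_right _ _
  · rcases min_choice st.minVp (f3 m) with h' | h'
    · exact ⟨i3, hi3a, by omega, by rw [h', hi3c]⟩
    · exact ⟨m, by omega, by omega, h'⟩
  · intro i h0 hi
    rcases lt_or_ge i m with h' | h'
    · exact le_trans (min_le_left _ _) (hb3 i h0 h')
    · rw [show i = m by omega]; exact min_le_right _ _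
  · rcases max_choice st.maxVm (f4 m) with h' | h'
    · exact ⟨i4, hi4a, by omega, by rw [h', hi4c]⟩
    · exact ⟨m, by omega, by omega, h'⟩
  · intro i h0 hi
    rcases lt_or_ge i m with h' | h'
    · exact le_trans (hb4 i h0 h') (le_max_left _ _)
    · rw [show i = m by omega]; exact le_max_right _ _
  · exact le_trans hbest0 hB
  · intro i j h0 hij hj
    rcases lt_or_ge j m with h' | h'
    · obtain ⟨c1, c2, c3, c4⟩ := hpair i j h0 hij h'
      exact ⟨le_trans c1 hB, le_trans c2 hB, le_trans c3 hB, le_trans c4 hB⟩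
    · rw [show j = m by omega] at hij ⊢
      rcases lt_or_ge i m with h'' | h''
      · refine ⟨le_trans ?_ hE1, le_trans ?_ hE2, le_trans ?_ hE3, le_trans ?_ hE4⟩
        · have := hb1 i h0 h''; omega
        · have := hb2 i h0 h''; omega
        · have := hb3 i h0 h''; omega
        · have := hb4 i h0 h''; omega
      · refine ⟨?_, ?_, ?_, ?_⟩ <;> rw [show i = m by omega] <;>
          (have := le_trans hbest0 hB; omega)
  · rcases max_choice (max (max (max st.best (f1 m - st.minUp)) (st.maxUm - f2 m))
        (f3 m - st.minVp)) (st.maxVm - f4 m) with h' | h'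
    · rcases max_choice (max (max st.best (f1 m - st.minUp)) (st.maxUm - f2 m))
          (f3 m - st.minVp) with h'' | h''
      · rcases max_choice (max st.best (f1 m - st.minUp)) (st.maxUm - f2 m) with h3 | h3
        · rcases max_choice st.best (f1 m - st.minUp) with h4 | h4
          · -- new best = old best
            rw [h', h'', h3, h4]
            rcases hatt with hz | ⟨i, j, ha, hb, hc, hd⟩
            · exact Or.inl hz
            · exact Or.inr ⟨i, j, ha, hb, by omega, hd⟩
          · rw [h', h'', h3, h4, hi1c]
            exact Or.inr ⟨i1, m, hi1a, by omega, by omega, Or.inl rfl⟩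
        · rw [h', h'', h3, hi2c]
          exact Or.inr ⟨i2, m, hi2a, by omega, by omega, Or.inr (Or.inl rfl)⟩
      · rw [h', h'', hi3c]
        exact Or.inr ⟨i3, m, hi3a, by omega, by omega, Or.inr (Or.inr (Or.inl rfl))⟩
    · rw [h', hi4c]
      exact Or.inr ⟨i4, m, hi4a, by omega, by omega, Or.inr (Or.inr (Or.inr rfl))⟩

theorem pvInvFold (f1 f2 f3 f4 : Int → Int) (n : Int) (hn : 1 ≤ n) :
    PvInv f1 f2 f3 f4 n
      ((PySem.List.pyRange 1 n 1).foldl (pvStepG f1 f2 f3 f4) ⟨f1 0, f2 0, f3 0, f4 0, 0⟩) := by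
  obtain ⟨t, rfl⟩ : ∃ t : Nat, n = 1 + (t : Int) := ⟨(n - 1).toNat, by omega⟩
  induction t with
  | zero =>
    rw [show ((1 : Int) + (0 : Nat) = 1) by norm_num, PySem.List.pyRange_one_eq_nil (by omega)]
    simp only [List.foldl_nil]
    refine ⟨⟨⟨0, by omega, by omega, rfl⟩, ?_⟩, ⟨⟨0, by omega, by omega, rfl⟩, ?_⟩,
      ⟨⟨0, by omega, by omega, rfl⟩, ?_⟩, ⟨⟨0, by omega, by omega, rfl⟩, ?_⟩,
      le_refl 0, ?_, Or.inl rfl⟩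
    · intro i h0 hi; simp [show i = 0 by omega]
    · intro i h0 hi; simp [show i = 0 by omega]
    · intro i h0 hi; simp [show i = 0 by omega]
    · intro i h0 hi; simp [show i = 0 by omega]
    · intro i j h0 hij hj
      refine ⟨?_, ?_, ?_, ?_⟩ <;> simp [show i = 0 by omega, show j = 0 by omega]
  | succ t ih =>
    have h1 : (1 : Int) + ((t : Nat) + 1 : Nat) = (1 + (t : Int)) + 1 := by push_cast; ring
    rw [h1, PySem.List.pyRange_one_succ_right (by omega), List.foldl_append, List.foldl_cons,
      List.foldl_nil]
    exact pvInvStep f1 f2 f3 f4 (1 + (t : Int)) _ (ih (by omega)) (by omega)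

-- every index below n is bounded by the running max started at f 0, and dually
theorem pvMxGe (f : Int → Int) (n : Int) (j : Int) (h0 : 0 ≤ j) (hj : j < n) :
    f j ≤ ((PySem.List.pyRange 1 n 1).map f).foldl max (f 0) := by
  rcases eq_or_lt_of_le h0 with h | h
  · exact h ▸ (PySem.List.le_foldl_max _ _).1
  · exact (PySem.List.le_foldl_max _ _).2 _ (List.mem_map.mpr ⟨j, PySem.List.mem_pyRange_one.mpr ⟨h, hj⟩, rfl⟩)

theorem pvMnLe (f : Int → Int) (n : Int) (j : Int) (h0 : 0 ≤ j) (hj : j < n) :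
    ((PySem.List.pyRange 1 n 1).map f).foldl min (f 0) ≤ f j := by
  rcases eq_or_lt_of_le h0 with h | h
  · exact h ▸ (PySem.List.foldl_min_le _ _).1
  · exact (PySem.List.foldl_min_le _ _).2 _ (List.mem_map.mpr ⟨j, PySem.List.mem_pyRange_one.mpr ⟨h, hj⟩, rfl⟩)

-- the running max/min are attained at some index below n
theorem pvMxMem (f : Int → Int) (n : Int) (hn : 1 ≤ n) :
    ∃ p, 0 ≤ p ∧ p < n ∧ ((PySem.List.pyRange 1 n 1).map f).foldl max (f 0) = f p := by
  rcases PySem.List.foldl_max_mem ((PySem.List.pyRange 1 n 1).map f) (f 0) with h | h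
  · exact ⟨0, le_refl _, by omega, h⟩
  · rcases List.mem_map.mp h with ⟨p, hp, hfp⟩
    rcases PySem.List.mem_pyRange_one.mp hp with ⟨h1, h2⟩
    exact ⟨p, by omega, h2, hfp.symm⟩

theorem pvMnMem (f : Int → Int) (n : Int) (hn : 1 ≤ n) :
    ∃ p, 0 ≤ p ∧ p < n ∧ ((PySem.List.pyRange 1 n 1).map f).foldl min (f 0) = f p := by
  rcases PySem.List.foldl_min_mem ((PySem.List.pyRange 1 n 1).map f) (f 0) with h | h
  · exact ⟨0, le_refl _, by omega, h⟩
  · rcases List.mem_map.mp h with ⟨p, hp, hfp⟩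
    rcases PySem.List.mem_pyRange_one.mp hp with ⟨h1, h2⟩
    exact ⟨p, by omega, h2, hfp.symm⟩

theorem pvMain (f1 f2 f3 f4 : Int → Int)
    (h12 : ∀ i, f1 i = f2 i + 2 * i) (h34 : ∀ i, f3 i = f4 i + 2 * i)
    (n : Int) (hn : 1 ≤ n) :
    max (max (max
      (((PySem.List.pyRange 1 n 1).map f1).foldl max (f1 0) - ((PySem.List.pyRange 1 n 1).map f1).foldl min (f1 0))
      (((PySem.List.pyRange 1 n 1).map f2).foldl max (f2 0) - ((PySem.List.pyRange 1 n 1).map f2).foldl min (f2 0)))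
      (((PySem.List.pyRange 1 n 1).map f3).foldl max (f3 0) - ((PySem.List.pyRange 1 n 1).map f3).foldl min (f3 0)))
      (((PySem.List.pyRange 1 n 1).map f4).foldl max (f4 0) - ((PySem.List.pyRange 1 n 1).map f4).foldl min (f4 0))
    = ((PySem.List.pyRange 1 n 1).foldl (pvStepG f1 f2 f3 f4) ⟨f1 0, f2 0, f3 0, f4 0, 0⟩).best := by
  obtain ⟨⟨_, hb1⟩, ⟨_, hb2⟩, ⟨_, hb3⟩, ⟨_, hb4⟩, hbest0, hpair, hatt⟩ :=
    pvInvFold f1 f2 f3 f4 n hn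
  set st := (PySem.List.pyRange 1 n 1).foldl (pvStepG f1 f2 f3 f4) ⟨f1 0, f2 0, f3 0, f4 0, 0⟩
  set M1 := ((PySem.List.pyRange 1 n 1).map f1).foldl max (f1 0) with hM1
  set m1 := ((PySem.List.pyRange 1 n 1).map f1).foldl min (f1 0) with hm1
  set M2 := ((PySem.List.pyRange 1 n 1).map f2).foldl max (f2 0) with hM2
  set m2 := ((PySem.List.pyRange 1 n 1).map f2).foldl min (f2 0) with hm2
  set M3 := ((PySem.List.pyRange 1 n 1).map f3).foldl max (f3 0) with hM3
  set m3 := ((PySem.List.pyRange 1 n 1).map f3).foldl min (f3 0) with hm3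
  set M4 := ((PySem.List.pyRange 1 n 1).map f4).foldl max (f4 0) with hM4
  set m4 := ((PySem.List.pyRange 1 n 1).map f4).foldl min (f4 0) with hm4
  have ch1 : M1 - m1 ≤ max (max (max (M1 - m1) (M2 - m2)) (M3 - m3)) (M4 - m4) :=
    le_trans (le_max_left _ _) (le_trans (le_max_left _ _) (le_max_left _ _))
  have ch2 : M2 - m2 ≤ max (max (max (M1 - m1) (M2 - m2)) (M3 - m3)) (M4 - m4) :=
    le_trans (le_max_right _ _) (le_trans (le_max_left _ _) (le_max_left _ _))
  have ch3 : M3 - m3 ≤ max (max (max (M1 - m1) (M2 - m2)) (M3 - m3)) (M4 - m4) :=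
    le_trans (le_max_right _ _) (le_max_left _ _)
  have ch4 : M4 - m4 ≤ max (max (max (M1 - m1) (M2 - m2)) (M3 - m3)) (M4 - m4) :=
    le_max_right _ _
  apply le_antisymm
  · -- each spread is witnessed by a pair of indices, which the sweep has seen
    have s1 : M1 - m1 ≤ st.best := by
      obtain ⟨p, hp0, hpn, hpe⟩ := pvMxMem f1 n hn
      obtain ⟨q, hq0, hqn, hqe⟩ := pvMnMem f1 n hn
      rw [← hM1] at hpe; rw [← hm1] at hqe
      rw [hpe, hqe]
      rcases le_or_gt q p with h | h
      · have := (hpair q p hq0 h hpn).1; omega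
      · have := (hpair p q hp0 (le_of_lt h) hqn).2.1
        have := h12 p; have := h12 q; omega
    have s2 : M2 - m2 ≤ st.best := by
      obtain ⟨p, hp0, hpn, hpe⟩ := pvMxMem f2 n hn
      obtain ⟨q, hq0, hqn, hqe⟩ := pvMnMem f2 n hn
      rw [← hM2] at hpe; rw [← hm2] at hqe
      rw [hpe, hqe]
      rcases le_or_gt p q with h | h
      · have := (hpair p q hp0 h hqn).2.1; omega
      · have := (hpair q p hq0 (le_of_lt h) hpn).1
        have := h12 p; have := h12 q; omega
    have s3 : M3 - m3 ≤ st.best := by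
      obtain ⟨p, hp0, hpn, hpe⟩ := pvMxMem f3 n hn
      obtain ⟨q, hq0, hqn, hqe⟩ := pvMnMem f3 n hn
      rw [← hM3] at hpe; rw [← hm3] at hqe
      rw [hpe, hqe]
      rcases le_or_gt q p with h | h
      · have := (hpair q p hq0 h hpn).2.2.1; omega
      · have := (hpair p q hp0 (le_of_lt h) hqn).2.2.2
        have := h34 p; have := h34 q; omega
    have s4 : M4 - m4 ≤ st.best := by
      obtain ⟨p, hp0, hpn, hpe⟩ := pvMxMem f4 n hn
      obtain ⟨q, hq0, hqn, hqe⟩ := pvMnMem f4 n hn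
      rw [← hM4] at hpe; rw [← hm4] at hqe
      rw [hpe, hqe]
      rcases le_or_gt p q with h | h
      · have := (hpair p q hp0 h hqn).2.2.2; omega
      · have := (hpair q p hq0 (le_of_lt h) hpn).2.2.1
        have := h34 p; have := h34 q; omega
    exact max_le (max_le (max_le s1 s2) s3) s4
  · -- the sweep's best is one of the pair differences, bounded by the matching spread
    rcases hatt with hz | ⟨i, j, h0, hij, hjn, hcase⟩
    · rw [hz]
      have h1 := pvMxGe f1 n 0 le_rfl (by omega)
      have h2 := pvMnLe f1 n 0 le_rfl (by omega)
      rw [← hM1] at h1; rw [← hm1] at h2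
      have : (0 : Int) ≤ M1 - m1 := by omega
      exact le_trans this ch1
    · have hj0 : (0 : Int) ≤ j := by omega
      rcases hcase with h | h | h | h
      · rw [h]
        have h1 := pvMxGe f1 n j hj0 hjn
        have h2 := pvMnLe f1 n i h0 (by omega)
        rw [← hM1] at h1; rw [← hm1] at h2
        exact le_trans (by omega) ch1
      · rw [h]
        have h1 := pvMxGe f2 n i h0 (by omega)
        have h2 := pvMnLe f2 n j hj0 hjn
        rw [← hM2] at h1; rw [← hm2] at h2
        exact le_trans (by omega) ch2
      · rw [h]
        have h1 := pvMxGe f3 n j hj0 hjn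
        have h2 := pvMnLe f3 n i h0 (by omega)
        rw [← hM3] at h1; rw [← hm3] at h2
        exact le_trans (by omega) ch3
      · rw [h]
        have h1 := pvMxGe f4 n i h0 (by omega)
        have h2 := pvMnLe f4 n j hj0 hjn
        rw [← hM4] at h1; rw [← hm4] at h2
        exact le_trans (by omega) ch4

-- ===== VERDICT (by name: the statement is the Claim_ definition above) =====
theorem solution_763_3_spec : Claim_equal_solution_763_3 := by
  intro arr1 arr2 _ hpre
  obtain ⟨hne, _⟩ := hpre
  unfold Spec_solution_763_3 solution_763_3 solution_763_3_alt
  have hn : (0 : Int) < (arr1.length : Int) := by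
    cases arr1 with
    | nil => exact absurd rfl hne
    | cons a t => simp
  dsimp only
  rw [PySem.List.pyRange_one_cons hn, List.foldl_cons]
  have h0 : pvStepA arr1 arr2 ([], [], [], []) 0 =
      ([PySem.List.pyGetD arr1 0 0 + PySem.List.pyGetD arr2 0 0],
       [PySem.List.pyGetD arr1 0 0 + PySem.List.pyGetD arr2 0 0],
       [PySem.List.pyGetD arr1 0 0 - PySem.List.pyGetD arr2 0 0],
       [PySem.List.pyGetD arr1 0 0 - PySem.List.pyGetD arr2 0 0]) := by
    simp [pvStepA]
  rw [h0, pvFoldA]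
  have hstep : pvStepB arr1 arr2 =
      pvStepG (fun i => PySem.List.pyGetD arr1 i 0 + PySem.List.pyGetD arr2 i 0 + i)
              (fun i => PySem.List.pyGetD arr1 i 0 + PySem.List.pyGetD arr2 i 0 - i)
              (fun i => PySem.List.pyGetD arr1 i 0 - PySem.List.pyGetD arr2 i 0 + i)
              (fun i => PySem.List.pyGetD arr1 i 0 - PySem.List.pyGetD arr2 i 0 - i) := rfl
  have key := pvMain
    (fun i => PySem.List.pyGetD arr1 i 0 + PySem.List.pyGetD arr2 i 0 + i)
    (fun i => PySem.List.pyGetD arr1 i 0 + PySem.List.pyGetD arr2 i 0 - i)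
    (fun i => PySem.List.pyGetD arr1 i 0 - PySem.List.pyGetD arr2 i 0 + i)
    (fun i => PySem.List.pyGetD arr1 i 0 - PySem.List.pyGetD arr2 i 0 - i)
    (by intro i; ring) (by intro i; ring) (arr1.length : Int) (by omega)
  simp only [add_zero, sub_zero] at key
  rw [hstep]
  simp only [List.singleton_append, PySem.List.max?_id_cons, PySem.List.min?_id_cons,
    Option.getD_some]
  exact key
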